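-- pv_equiv track=rewrite | github.com/sauremilk/drift | scripts/doc_consistency_issues.py | _group_discrepancies
-- ===== SOURCE A (Python) =====
-- from typing import Any
--
-- def _group_discrepancies(
--     discs: list[dict[str, Any]],
-- ) -> dict[str, list[dict[str, Any]]]:
--     """Group discrepancies by source_file for issue bundling."""
--     groups: dict[str, list[dict[str, Any]]] = {}
--     for d in discs:
--         key = d.get("source_file", "unknown")
--         groups.setdefault(key, []).append(d)
--     return groups
-- ===== SOURCE B (Python) =====
-- from typing import Any
--
-- def _group_discrepancies(
--     discs: list[dict[str, Any]],
-- ) -> dict[str, list[dict[str, Any]]]: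
--     """Group by source_file via repeated partitioning: peel off the first
--     remaining key's whole group, keep the rest, until nothing is left."""
--     out: dict[str, list[dict[str, Any]]] = {}
--     rest = discs
--     while rest:
--         key = rest[0].get("source_file", "unknown")
--         out[key] = [d for d in rest if d.get("source_file", "unknown") == key]
--         rest = [d for d in rest if d.get("source_file", "unknown") != key]
--     return out
-- ===== Notes on version B (the rewrite author's own statement) =====
-- stated objective: alternative
-- what changed: A buckets in a single pass with dict setdefault+append; B uses no bucketing dict at all: it repeatedly partitions the remaining list on the first item's key, emitting each key's whole group in one filter pass and looping on the leftover, so key order (first appearance) and within-group order match A.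
import Mathlib
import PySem

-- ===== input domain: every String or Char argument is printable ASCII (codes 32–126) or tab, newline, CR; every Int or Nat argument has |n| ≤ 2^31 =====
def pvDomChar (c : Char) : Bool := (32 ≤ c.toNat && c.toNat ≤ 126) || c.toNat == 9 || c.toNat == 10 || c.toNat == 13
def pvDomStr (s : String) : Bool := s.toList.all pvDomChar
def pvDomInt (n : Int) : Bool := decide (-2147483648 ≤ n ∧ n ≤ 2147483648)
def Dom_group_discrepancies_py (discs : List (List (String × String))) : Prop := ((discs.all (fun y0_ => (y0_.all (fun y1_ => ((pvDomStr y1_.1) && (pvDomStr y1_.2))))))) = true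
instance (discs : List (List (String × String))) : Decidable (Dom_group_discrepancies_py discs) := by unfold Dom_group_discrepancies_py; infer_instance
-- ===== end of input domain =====

-- B replaces A's one-pass setdefault bucketing by repeated partitioning: peel off the first remaining key's whole group, loop on the leftover (objective: alternative algorithm, same results; purely functional, no mutation).


-- ===== PORT A =====
-- d.get("source_file", "unknown") on the dict d (both Pythons compute this the same way)
def pvKey (d : List (String × String)) : String :=
  (PySem.Dict.mk d).getD "source_file" "unknown"

-- groups.setdefault(key, []).append(d)  ==  groups[key] = groups.get(key, []) + [d]  = Dict.modify
def group_discrepancies_py (discs : List (List (String × String))) : List (String × List (List (String × String))) :=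
  (discs.foldl (fun groups d => groups.modify (pvKey d) [] (· ++ [d])) PySem.Dict.empty).items

-- ===== PORT B =====
-- B's while-loop: each iteration writes out[key] = <whole group of key> and keeps rest.
-- As key is filtered out of rest, every key written later is fresh, so the dict
-- assignment out[key] = ... appends exactly one item: the loop IS this recursion.
def group_discrepancies_py_alt : (discs : List (List (String × String))) → List (String × List (List (String × String)))
  | [] => []
  | d :: ds =>
    (pvKey d, (d :: ds).filter (fun x => pvKey x == pvKey d)) ::
      group_discrepancies_py_alt ((d :: ds).filter (fun x => !(pvKey x == pvKey d)))
termination_by discs => discs.length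
decreasing_by
  simp only [List.filter_cons, beq_self_eq_true, Bool.not_true, List.length_cons]
  exact Nat.lt_succ_of_le (List.length_filter_le _ _)

-- ===== PRECONDITION & SPEC =====
def Spec_group_discrepancies_py (discs : List (List (String × String))) (out : List (String × List (List (String × String)))) : Prop := out = group_discrepancies_py_alt discs
instance (discs : List (List (String × String))) (out : List (String × List (List (String × String)))) : Decidable (Spec_group_discrepancies_py discs out) := by unfold Spec_group_discrepancies_py; infer_instance

-- ===== CLAIM =====
def Claim_equal_group_discrepancies_py : Prop := ∀ (discs : List (List (String × String))), Dom_group_discrepancies_py discs → Spec_group_discrepancies_py discs (group_discrepancies_py discs)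

-- ===== LEMMAS AND PROOFS =====

-- dedup (= Set.ofList = foldl Set.add []) recursion: skipping elements already in the accumulator
theorem pvFoldlAdd_skip {α : Type} [BEq α] [LawfulBEq α] (k : α) :
    ∀ (xs s : List α), s.contains k = true →
      xs.foldl PySem.Set.add s = (xs.filter (fun y => !(y == k))).foldl PySem.Set.add s := by
  intro xs
  induction xs with
  | nil => intro s _; rfl
  | cons x xs ih =>
    intro s hs
    have hk : k ∈ s := by simpa [List.contains_eq_mem] using hs
    by_cases hxk : x = k
    · subst hxk
      simp only [List.filter_cons, beq_self_eq_true, Bool.not_true, List.foldl_cons]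
      have hadd : PySem.Set.add s x = s := by
        simp [PySem.Set.add, List.contains_eq_mem, hk]
      rw [hadd]; exact ih s hs
    · have hxkb : (x == k) = false := by simp [hxk]
      simp only [List.filter_cons, hxkb, Bool.not_false, if_true, List.foldl_cons]
      apply ih
      unfold PySem.Set.add
      split <;> simp [List.contains_eq_mem, hk]

-- pulling an element the tail never mentions out of the accumulator
theorem pvFoldlAdd_cons {α : Type} [BEq α] [LawfulBEq α] (a : α) :
    ∀ (l s : List α), (∀ y ∈ l, (y == a) = false) →
      l.foldl PySem.Set.add (a :: s) = a :: l.foldl PySem.Set.add s := by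
  intro l
  induction l with
  | nil => intro s _; rfl
  | cons y l ih =>
    intro s hl
    have hya : (y == a) = false := hl y (by simp)
    have hyane : y ≠ a := by simpa using hya
    have hcontains : PySem.Set.contains (a :: s) y = s.contains y := by
      simp [PySem.Set.contains, List.contains_eq_mem, hyane]
    simp only [List.foldl_cons]
    have hadd1 : PySem.Set.add (a :: s) y
        = if s.contains y = true then (a :: s) else (a :: s) ++ [y] := by
      rw [PySem.Set.add, hcontains]
    have hadd2 : PySem.Set.add s y = if s.contains y = true then s else s ++ [y] := rfl
    rw [hadd1, hadd2]
    by_cases hc : s.contains y = true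
    · rw [if_pos hc, if_pos hc]
      exact ih s (fun z hz => hl z (List.mem_cons_of_mem _ hz))
    · rw [if_neg hc, if_neg hc]
      have hshape : (a :: s) ++ [y] = a :: (s ++ [y]) := by simp
      rw [hshape]
      exact ih (s ++ [y]) (fun z hz => hl z (List.mem_cons_of_mem _ hz))

theorem pvDedup_cons (k : String) (xs : List String) :
    PySem.List.dedup (k :: xs) = k :: PySem.List.dedup (xs.filter (fun y => !(y == k))) := by
  show PySem.Set.ofList (k :: xs) = k :: PySem.Set.ofList (xs.filter (fun y => !(y == k)))
  unfold PySem.Set.ofList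
  simp only [List.foldl_cons]
  have h1 : PySem.Set.add PySem.Set.empty k = [k] := rfl
  rw [h1]
  rw [pvFoldlAdd_skip k xs [k] (by simp)]
  exact pvFoldlAdd_cons k _ [] (fun y hy => by
    have := List.of_mem_filter hy; simpa using this)

-- B computes: first-appearance-deduped keys, each paired with its filter over the WHOLE input
theorem pvAlt_eq (discs : List (List (String × String))) :
    group_discrepancies_py_alt discs
      = (PySem.List.dedup (discs.map pvKey)).map
          (fun k => (k, discs.filter (fun d => pvKey d == k))) := by
  induction discs using group_discrepancies_py_alt.induct with
  | case1 => simp [group_discrepancies_py_alt, PySem.List.dedup, PySem.Set.ofList, PySem.Set.empty]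
  | case2 d ds ih =>
    rw [group_discrepancies_py_alt]
    have hrest : (d :: ds).filter (fun x => !(pvKey x == pvKey d))
        = ds.filter (fun x => !(pvKey x == pvKey d)) := by
      simp
    have hmapcons : (d :: ds).map pvKey = pvKey d :: ds.map pvKey := by simp
    have hfiltmap : (ds.map pvKey).filter (fun y => !(y == pvKey d))
        = ((d :: ds).filter (fun x => !(pvKey x == pvKey d))).map pvKey := by
      rw [hrest, List.filter_map]; rfl
    rw [ih, hmapcons, pvDedup_cons, hfiltmap]
    simp only [List.map_cons]
    refine congrArg₂ List.cons rfl ?_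
    apply List.map_congr_left
    intro k hk
    have hkmem : k ∈ ((d :: ds).filter (fun x => !(pvKey x == pvKey d))).map pvKey :=
      (PySem.List.mem_dedup _ _).mp hk
    have hkne : k ≠ pvKey d := by
      rcases List.mem_map.mp hkmem with ⟨x, hx, hxk⟩
      have hxf := List.of_mem_filter hx
      intro h; rw [h] at hxk; simp [hxk] at hxf
    have hfilters : (d :: ds).filter (fun x => pvKey x == k)
        = ((d :: ds).filter (fun x => !(pvKey x == pvKey d))).filter (fun x => pvKey x == k) := by
      rw [hrest, List.filter_cons]
      have hd : (pvKey d == k) = false := by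
        simp only [beq_eq_false_iff_ne]; exact fun h => hkne h.symm
      rw [hd]
      simp only [Bool.false_eq_true, if_false, List.filter_filter]
      apply List.filter_congr
      intro x _
      by_cases hx : pvKey x = k
      · have h1 : (pvKey x == k) = true := by simp [hx]
        have h2 : (pvKey x == pvKey d) = false := by simp [hx]; exact hkne
        simp [h1, h2]
      · simp [hx]
    rw [hfilters]

-- A's dict, written over key-value pairs so the library modify-loop lemmas apply
theorem pvA_eq_pairs (discs : List (List (String × String))) :
    discs.foldl (fun groups d => groups.modify (pvKey d) [] (· ++ [d])) PySem.Dict.empty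
      = (discs.map (fun d => (pvKey d, d))).foldl (fun g p => g.modify p.1 [] (· ++ [p.2])) PySem.Dict.empty := by
  rw [List.foldl_map]

theorem pvA_keys (discs : List (List (String × String))) :
    (discs.foldl (fun groups d => groups.modify (pvKey d) [] (· ++ [d])) PySem.Dict.empty).keys
      = PySem.List.dedup (discs.map pvKey) := by
  have h := PySem.Dict.keys_foldl_modify_key discs pvKey [] (fun _ d xs => xs ++ [d]) PySem.Dict.empty
  simpa [PySem.Dict.keys_empty, PySem.List.dedup_eq_ofList] using h

theorem pvA_nodup (discs : List (List (String × String))) :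
    (discs.foldl (fun groups d => groups.modify (pvKey d) [] (· ++ [d])) PySem.Dict.empty).keys.Nodup := by
  rw [pvA_keys]; exact PySem.List.nodup_dedup _

theorem pvA_getD (discs : List (List (String × String))) (k : String) :
    (discs.foldl (fun groups d => groups.modify (pvKey d) [] (· ++ [d])) PySem.Dict.empty).getD k []
      = discs.filter (fun d => pvKey d == k) := by
  rw [pvA_eq_pairs, PySem.Dict.getD_foldl_modify_append]
  simp [PySem.Dict.getD_empty, List.filter_map, Function.comp_def]

-- ===== VERDICT =====
theorem group_discrepancies_py_spec : Claim_equal_group_discrepancies_py := by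
  intro discs _
  unfold Spec_group_discrepancies_py group_discrepancies_py
  rw [PySem.Dict.items_eq_map_keys _ (pvA_nodup discs) []]
  rw [pvA_keys, pvAlt_eq]
  exact List.map_congr_left (fun k _ => by rw [pvA_getD])
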